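-- pv_equiv track=rewrite | github.com/pypi-data/pypi-mirror-16 | packages/mscript/mscript-1.0.0-py2.py3-none-any.whl/mscript/__init__.py | tag_code
-- ===== SOURCE A (Python) =====
-- def tag_code(s):
-- 	code = []
-- 	is_string = False
-- 	string_char = ''
-- 	escaped = False
-- 	current_block = ""
-- 	for c in s:
-- 		if is_string:
-- 			if not escaped and c == string_char:
-- 				code.append((current_block + c, "string"))
-- 				current_block = ""
-- 				is_string = False
-- 				continue
-- 			elif escaped:
-- 				escaped = False
-- 			elif c == "\\":
-- 				escaped = True
-- 			current_block = current_block +c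
-- 		else:
-- 			if c == "\"":
-- 				string_char = "\""
-- 				code.append((current_block, "code"))
-- 				current_block = "\""
-- 				is_string = True
-- 			elif c == "\'":
-- 				string_char = "\'"
-- 				code.append((current_block, "code"))
-- 				current_block = "\'"
-- 				is_string = True
-- 			else:
-- 				current_block = current_block +c
-- 	code.append((current_block, "code"))
-- 	return code
-- ===== SOURCE B (Python) =====
-- def tag_code(s):
--     # Index-based scanner: emits code slices between string literals found by an
--     # inner closing-quote search (skipping escaped chars), instead of a per-char
--     # state machine.
--     out = []
--     n = len(s)
--     code_start = 0
--     i = 0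
--     while i < n:
--         c = s[i]
--         if c == '"' or c == "'":
--             out.append((s[code_start:i], "code"))
--             j = i + 1
--             while j < n:
--                 if s[j] == '\\':
--                     j += 2
--                 elif s[j] == c:
--                     break
--                 else:
--                     j += 1
--             if j < n:
--                 out.append((s[i:j+1], "string"))
--                 code_start = i = j + 1
--             else:
--                 code_start = i
--                 break
--         else:
--             i += 1
--     out.append((s[code_start:], "code"))
--     return out
-- ===== Notes on version B (the rewrite author's own statement) =====
-- stated objective: alternative
-- what changed: Replaces A's per-character boolean state machine (is_string/escaped flags threaded through one loop) by an index-based scanner: an outer loop over code regions that, on a quote, runs an inner search for the unescaped closing quote (skipping 2 past backslashes) and emits whole slices.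
import Mathlib
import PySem

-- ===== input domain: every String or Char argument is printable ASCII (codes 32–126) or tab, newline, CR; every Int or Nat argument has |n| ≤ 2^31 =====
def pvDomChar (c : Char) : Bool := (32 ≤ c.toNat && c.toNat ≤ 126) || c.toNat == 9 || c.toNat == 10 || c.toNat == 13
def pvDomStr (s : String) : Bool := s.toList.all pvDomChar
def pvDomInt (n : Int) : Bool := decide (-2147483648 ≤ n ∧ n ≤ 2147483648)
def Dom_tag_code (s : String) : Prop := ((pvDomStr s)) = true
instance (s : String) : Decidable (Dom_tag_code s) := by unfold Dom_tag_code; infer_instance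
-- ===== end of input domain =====

-- B replaces A's per-character boolean state machine by an index scanner with an
-- inner closing-quote search (objective: alternative decomposition, same cost).

-- ===== PORT A =====
-- per-character state machine: state = (is_string, string_char, escaped, current_block, code)
def tagALoop : List Char → Bool → Char → Bool → List Char → List (String × String) → List (String × String)
  | [], _, _, _, cur, code => code ++ [(String.ofList cur, "code")]
  | c :: rest, isStr, sc, esc, cur, code =>
    if isStr then
      if esc = false ∧ c = sc then
        tagALoop rest false sc esc [] (code ++ [(String.ofList (cur ++ [c]), "string")])
      else if esc = true then
        tagALoop rest true sc false (cur ++ [c]) code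
      else if c = '\\' then
        tagALoop rest true sc true (cur ++ [c]) code
      else
        tagALoop rest true sc esc (cur ++ [c]) code
    else
      if c = '"' then
        tagALoop rest true '"' esc ['"'] (code ++ [(String.ofList cur, "code")])
      else if c = '\'' then
        tagALoop rest true '\'' esc ['\''] (code ++ [(String.ofList cur, "code")])
      else
        tagALoop rest isStr sc esc (cur ++ [c]) code

def tag_code (s : String) : List (String × String) :=
  -- Python's string_char starts as '' and is never compared before being set; ' ' stands in.
  tagALoop s.toList false ' ' false [] []

-- ===== PORT B =====
-- inner while loop of Source B: index of the unescaped closing quote q from j on.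
-- The extra fuel argument only makes the j += 2 loop structural (cs.length fuel
-- always suffices); the computation is Source B's.
def bFind (cs : List Char) (q : Char) : Nat → Nat → Option Nat
  | 0, _ => none
  | fuel + 1, j =>
    if h : j < cs.length then
      if cs[j] = '\\' then bFind cs q fuel (j + 2)
      else if cs[j] = q then some j
      else bFind cs q fuel (j + 1)
    else none

-- outer while loop of Source B; slices s[a:b] (indices here always in range) are
-- (drop a).take (b-a); fuel cs.length - i bounds the remaining iterations.
def bMain (cs : List Char) : Nat → Nat → Nat → List (String × String) → List (String × String)
  | 0, code_start, _, out => out ++ [(String.ofList (cs.drop code_start), "code")]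
  | fuel + 1, code_start, i, out =>
    if h : i < cs.length then
      if cs[i] = '"' ∨ cs[i] = '\'' then
        let out' := out ++ [(String.ofList ((cs.drop code_start).take (i - code_start)), "code")]
        match bFind cs cs[i] cs.length (i + 1) with
        | some j =>
          bMain cs fuel (j + 1) (j + 1) (out' ++ [(String.ofList ((cs.drop i).take (j + 1 - i)), "string")])
        | none => out' ++ [(String.ofList (cs.drop i), "code")]
      else bMain cs fuel code_start (i + 1) out
    else out ++ [(String.ofList (cs.drop code_start), "code")]

def tag_code_alt (s : String) : List (String × String) :=
  bMain s.toList s.toList.length 0 0 []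

-- ===== PRECONDITION & SPEC =====
def Spec_tag_code (s : String) (out : List (String × String)) : Prop := out = tag_code_alt s
instance (s : String) (out : List (String × String)) : Decidable (Spec_tag_code s out) := by unfold Spec_tag_code; infer_instance

-- ===== CLAIM (what is proved, stated in full; the proofs are below) =====
def Claim_equal_tag_code : Prop := ∀ (s : String), Dom_tag_code s → Spec_tag_code s (tag_code s)

-- ===== LEMMAS AND PROOFS =====

-- single-step equations for A's state machine
theorem tagA_close (rest : List Char) (q : Char) (cur : List Char) (out : List (String × String)) :
    tagALoop (q :: rest) true q false cur out
      = tagALoop rest false q false [] (out ++ [(String.ofList (cur ++ [q]), "string")]) := by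
  simp [tagALoop]

theorem tagA_bs (rest : List Char) (q : Char) (hq : q ≠ '\\') (cur : List Char) (out : List (String × String)) :
    tagALoop ('\\' :: rest) true q false cur out
      = tagALoop rest true q true (cur ++ ['\\']) out := by
  simp [tagALoop, hq.symm]

theorem tagA_esc (c : Char) (rest : List Char) (q : Char) (cur : List Char) (out : List (String × String)) :
    tagALoop (c :: rest) true q true cur out
      = tagALoop rest true q false (cur ++ [c]) out := by
  simp [tagALoop]

theorem tagA_other (c : Char) (rest : List Char) (q : Char) (h1 : c ≠ q) (h2 : c ≠ '\\')
    (cur : List Char) (out : List (String × String)) :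
    tagALoop (c :: rest) true q false cur out
      = tagALoop rest true q false (cur ++ [c]) out := by
  simp [tagALoop, h1, h2]

theorem tagA_code_other (c : Char) (rest : List Char) (sc : Char) (esc : Bool)
    (h1 : c ≠ '"') (h2 : c ≠ '\'') (cur : List Char) (out : List (String × String)) :
    tagALoop (c :: rest) false sc esc cur out
      = tagALoop rest false sc esc (cur ++ [c]) out := by
  simp [tagALoop, h1, h2]

theorem tagA_code_quote' (c : Char) (rest : List Char) (sc : Char) (esc : Bool)
    (hc : c = '"' ∨ c = '\'') (cur : List Char) (out : List (String × String)) :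
    tagALoop (c :: rest) false sc esc cur out
      = tagALoop rest true c esc [c] (out ++ [(String.ofList cur, "code")]) := by
  rcases hc with h | h <;> subst h <;> simp [tagALoop]

-- slice extension: s[a:j] + [s[j]] = s[a:j+1]
theorem take_snoc (cs : List Char) (i j : Nat) (hij : i ≤ j) (hj : j < cs.length) :
    (cs.drop i).take (j - i) ++ [cs[j]] = (cs.drop i).take (j + 1 - i) := by
  rw [show j + 1 - i = (j - i) + 1 by omega, List.take_succ]
  congr 1
  rw [List.getElem?_drop, show i + (j - i) = j by omega,
    List.getElem?_eq_getElem hj]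
  rfl

theorem bFind_none (cs : List Char) (q : Char) (fuel j : Nat) (h : cs.length ≤ j) :
    bFind cs q fuel j = none := by
  cases fuel with
  | zero => rfl
  | succ fuel => unfold bFind; rw [dif_neg (by omega)]

theorem bFind_bounds (cs : List Char) (q : Char) (fuel : Nat) :
    ∀ k j, bFind cs q fuel k = some j → k ≤ j ∧ j < cs.length := by
  induction fuel with
  | zero => intro k j hf; cases hf
  | succ fuel ih =>
    intro k j hf
    unfold bFind at hf
    split at hf
    · split at hf
      · have := ih (k + 2) j hf; omega
      · split at hf
        · cases hf; omega
        · have := ih (k + 1) j hf; omega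
    · cases hf

-- A's string-mode run from position j (literal opened at i, no pending escape)
-- equals B's closing-quote search.
theorem stringScan (cs : List Char) (q : Char) (hq : q ≠ '\\') (i : Nat) :
    ∀ fuel j, cs.length - j ≤ fuel → i ≤ j → j ≤ cs.length → ∀ out,
      tagALoop (cs.drop j) true q false ((cs.drop i).take (j - i)) out =
        match bFind cs q fuel j with
        | some j' => tagALoop (cs.drop (j' + 1)) false q false []
            (out ++ [(String.ofList ((cs.drop i).take (j' + 1 - i)), "string")])
        | none => out ++ [(String.ofList (cs.drop i), "code")] := by
  intro fuel
  induction fuel with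
  | zero =>
    intro j hfu hij hjl out
    have hnil : cs.drop j = [] := by rw [List.drop_eq_nil_iff]; omega
    rw [hnil, bFind]
    simp only [tagALoop]
    rw [List.take_of_length_le (by simp [List.length_drop]; omega)]
  | succ fuel ih =>
    intro j hfu hij hjl out
    by_cases h : j < cs.length
    · rw [List.drop_eq_getElem_cons h]
      unfold bFind
      rw [dif_pos h]
      by_cases hbs : cs[j] = '\\'
      · rw [if_pos hbs, hbs, tagA_bs _ q hq _ out, ← hbs, take_snoc cs i j hij h]
        by_cases h2 : j + 1 < cs.length
        · rw [List.drop_eq_getElem_cons h2, tagA_esc _ _ q _ out,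
            take_snoc cs i (j + 1) (by omega) h2, ih (j + 2) (by omega) (by omega) (by omega) out]
        · have hnil : cs.drop (j + 1) = [] := by rw [List.drop_eq_nil_iff]; omega
          rw [hnil, bFind_none cs q fuel (j + 2) (by omega)]
          simp only [tagALoop]
          rw [show (cs.drop i).take (j + 1 - i) = cs.drop i from
            List.take_of_length_le (by simp [List.length_drop]; omega)]
      · rw [if_neg hbs]
        by_cases hcq : cs[j] = q
        · rw [if_pos hcq, hcq, tagA_close _ q _ out, ← hcq, take_snoc cs i j hij h]
        · rw [if_neg hcq, tagA_other _ _ q hcq hbs _ out, take_snoc cs i j hij h,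
            ih (j + 1) (by omega) (by omega) (by omega) out]
    · have hnil : cs.drop j = [] := by rw [List.drop_eq_nil_iff]; omega
      rw [hnil]
      unfold bFind
      rw [dif_neg h]
      simp only [tagALoop]
      rw [List.take_of_length_le (by simp [List.length_drop]; omega)]

-- A's code-mode run equals B's outer scan.
theorem mainScan (cs : List Char) :
    ∀ fuel i code_start out, cs.length - i ≤ fuel → code_start ≤ i → i ≤ cs.length → ∀ sc,
      bMain cs fuel code_start i out =
        tagALoop (cs.drop i) false sc false
          ((cs.drop code_start).take (i - code_start)) out := by
  intro fuel
  induction fuel with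
  | zero =>
    intro i code_start out hfu hci hil sc
    have hnil : cs.drop i = [] := by rw [List.drop_eq_nil_iff]; omega
    rw [hnil, bMain]
    simp only [tagALoop]
    rw [List.take_of_length_le (by simp [List.length_drop]; omega)]
  | succ fuel ih =>
    intro i code_start out hfu hci hil sc
    by_cases h : i < cs.length
    · rw [List.drop_eq_getElem_cons h]
      by_cases hquote : cs[i] = '"' ∨ cs[i] = '\''
      · have hnbs : cs[i] ≠ '\\' := by
          rcases hquote with h1 | h1 <;> rw [h1] <;> decide
        unfold bMain
        rw [dif_pos h, if_pos hquote,
          tagA_code_quote' _ _ sc false hquote _ out]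
        have hone : [cs[i]] = (cs.drop i).take (i + 1 - i) := by
          rw [← take_snoc cs i i le_rfl h]; simp
        rw [hone,
          stringScan cs cs[i] hnbs i cs.length (i + 1) (by omega) (by omega) (by omega)]
        cases hf : bFind cs cs[i] cs.length (i + 1) with
        | some j =>
          have hb := bFind_bounds cs cs[i] cs.length (i + 1) j hf
          simp only
          rw [ih (j + 1) (j + 1) _ (by omega) le_rfl (by omega) cs[i]]
          simp
        | none => simp
      · unfold bMain
        rw [dif_pos h, if_neg hquote]
        push Not at hquote
        rw [tagA_code_other _ _ sc false hquote.1 hquote.2 _ out,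
          take_snoc cs code_start i hci h]
        exact ih (i + 1) code_start out (by omega) (by omega) (by omega) sc
    · have hnil : cs.drop i = [] := by rw [List.drop_eq_nil_iff]; omega
      rw [hnil]
      unfold bMain
      rw [dif_neg h]
      simp only [tagALoop]
      rw [List.take_of_length_le (by simp [List.length_drop]; omega)]

-- ===== VERDICT (by name: the statement is the Claim_ definition above) =====
theorem tag_code_spec : Claim_equal_tag_code := by
  intro s _
  unfold Spec_tag_code tag_code tag_code_alt
  rw [mainScan s.toList s.toList.length 0 0 [] (by omega) le_rfl (by omega) ' ']
  simp
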